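-- pv_equiv track=rewrite | github.com/HEUOpenResource/HEUOpenResource.github.io | allContributors.py | remove_field
-- ===== SOURCE A (Python) =====
-- def remove_field(fm: str, field: str):
--     lines = fm.splitlines()
--     out = []
--     skip = False
--
--     for line in lines:
--         if line.startswith(f"{field}:"):
--             skip = True
--             continue
--         if skip:
--             if line.startswith("  "):
--                 continue
--             skip = False
--         out.append(line)
--
--     return "\n".join(out)
-- ===== SOURCE B (Python) =====
-- def remove_field(fm: str, field: str):
--     header = field + ":"
--     rev_out = []
--     for line in reversed(fm.splitlines()):
--         if line.startswith(header):
--             while rev_out and rev_out[-1].startswith("  "):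
--                 rev_out.pop()
--         else:
--             rev_out.append(line)
--     return "\n".join(reversed(rev_out))
-- ===== Notes on version B (the rewrite author's own statement) =====
-- stated objective: alternative
-- what changed: B scans the lines in reverse with a stack: on a header line it pops the already-kept indented lines off the stack, instead of A's forward scan with a skip-flag state machine that consumes children while reading input.
import Mathlib
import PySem

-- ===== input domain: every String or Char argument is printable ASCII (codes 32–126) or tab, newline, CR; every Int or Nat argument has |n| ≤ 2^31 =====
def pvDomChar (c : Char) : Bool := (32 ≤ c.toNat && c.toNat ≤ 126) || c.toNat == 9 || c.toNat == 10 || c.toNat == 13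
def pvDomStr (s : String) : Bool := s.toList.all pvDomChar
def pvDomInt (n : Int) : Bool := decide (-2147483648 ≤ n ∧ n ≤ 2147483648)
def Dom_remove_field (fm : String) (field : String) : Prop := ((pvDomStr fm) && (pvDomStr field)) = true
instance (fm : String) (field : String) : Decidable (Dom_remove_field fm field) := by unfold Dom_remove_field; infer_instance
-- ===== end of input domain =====

-- B scans the lines in REVERSE with a stack, popping already-kept indented lines off the
-- stack when a header line appears, instead of A's forward scan with a skip flag (alternative, same cost).

-- ===== PORT A =====
-- A's for-loop, carrying the skip flag; out is built in append order
def removeFieldLoopA (field : String) : List String → Bool → List String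
  | [], _ => []
  | line :: rest, skip =>
    if PySem.Str.startswith line (field ++ ":") then
      removeFieldLoopA field rest true
    else if skip then
      if PySem.Str.startswith line "  " then
        removeFieldLoopA field rest skip
      else
        line :: removeFieldLoopA field rest false
    else
      line :: removeFieldLoopA field rest false

def remove_field (fm : String) (field : String) : String :=
  PySem.Str.join "\n" (removeFieldLoopA field (PySem.Str.splitlines fm) false)

-- ===== PORT B =====
-- B's inner while loop: pop indented lines off the top of the stack.
-- The Python list rev_out is represented head-first (Lean head = Python rev_out[-1], the stack top),
-- so Python's final reversed(rev_out) is the Lean list itself.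
def popIndentB : List String → List String
  | [] => []
  | top :: rest => if PySem.Str.startswith top "  " then popIndentB rest else top :: rest

-- B's for-loop over reversed(lines), threading the stack
def removeFieldLoopB (header : String) : List String → List String → List String
  | [], stk => stk
  | line :: rest, stk =>
    removeFieldLoopB header rest
      (if PySem.Str.startswith line header then popIndentB stk else line :: stk)

def remove_field_alt (fm : String) (field : String) : String :=
  PySem.Str.join "\n" (removeFieldLoopB (field ++ ":") (PySem.Str.splitlines fm).reverse [])

-- ===== PRECONDITION & SPEC =====
def Spec_remove_field (fm : String) (field : String) (out : String) : Prop := out = remove_field_alt fm field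
instance (fm : String) (field : String) (out : String) : Decidable (Spec_remove_field fm field out) := by unfold Spec_remove_field; infer_instance

-- ===== CLAIM =====
def Claim_equal_remove_field : Prop := ∀ (fm : String) (field : String), Dom_remove_field fm field → Spec_remove_field fm field (remove_field fm field)

-- ===== LEMMAS AND PROOFS =====

-- proof-only recursive characterisation of the result (front recursion, no state)
def recBHelper (header : String) : List String → List String
  | [] => []
  | l :: rest =>
    if PySem.Str.startswith l header then popIndentB (recBHelper header rest)
    else l :: recBHelper header rest

theorem popIndentB_idem : ∀ s, popIndentB (popIndentB s) = popIndentB s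
  | [] => rfl
  | top :: rest => by
    rw [popIndentB]
    split
    · exact popIndentB_idem rest
    · rw [popIndentB]; simp_all

-- B's fold over the reversed lines computes recBHelper
theorem loopB_recB (header : String) : ∀ (rev suf : List String),
    removeFieldLoopB header rev (recBHelper header suf) = recBHelper header (rev.reverse ++ suf)
  | [], suf => by simp [removeFieldLoopB]
  | l :: rest, suf => by
    rw [removeFieldLoopB]
    have hstep : (if PySem.Str.startswith l header then popIndentB (recBHelper header suf)
        else l :: recBHelper header suf) = recBHelper header (l :: suf) := by
      rw [recBHelper]
    rw [hstep, loopB_recB header rest (l :: suf)]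
    simp

-- A's flag machine computes recBHelper too (skip=true means strip the indented prefix)
theorem loopA_recB (field : String) : ∀ (ls : List String),
    removeFieldLoopA field ls false = recBHelper (field ++ ":") ls ∧
    removeFieldLoopA field ls true = popIndentB (recBHelper (field ++ ":") ls)
  | [] => by constructor <;> rfl
  | l :: rest => by
    obtain ⟨ihF, ihT⟩ := loopA_recB field rest
    constructor
    · rw [removeFieldLoopA, recBHelper]
      split
      · exact ihT
      · simp [ihF]
    · rw [removeFieldLoopA, recBHelper]
      split
      · rw [ihT, popIndentB_idem]
      · by_cases hsp : PySem.Str.startswith l "  " = true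
        · simp only [hsp, if_true, popIndentB, ihT]
        · simp only [hsp, if_false, Bool.false_eq_true, popIndentB, ihF]
          simp

-- ===== VERDICT =====
theorem remove_field_spec : Claim_equal_remove_field := by
  intro fm field _
  unfold Spec_remove_field remove_field remove_field_alt
  have hB := loopB_recB (field ++ ":") (PySem.Str.splitlines fm).reverse []
  simp only [recBHelper, List.reverse_reverse, List.append_nil] at hB
  rw [hB, (loopA_recB field (PySem.Str.splitlines fm)).1]
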